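-- pv_equiv track=rewrite | github.com/rm12000356/BPSK-perceptron-ml | BPSK_perceptron/data_uti.py | labels_creation
-- ===== SOURCE A (Python) =====
-- def labels_creation(num_of_points):
--     base=0
--     possible_labels = []
--     for l in range(0,num_of_points):
--         if l%2 == 0:
--             possible_labels.append(1 + base * 2)
--         else:
--             possible_labels.append(-1 - base * 2)
--             base=base+1
--     return possible_labels
-- ===== SOURCE B (Python) =====
-- def labels_creation(num_of_points):
--     # closed form per index: even l -> l+1, odd l -> -l
--     return [l + 1 if l % 2 == 0 else -l for l in range(num_of_points)]
-- ===== Notes on version B (the rewrite author's own statement) =====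
-- stated objective: simpler
-- what changed: Replaced the running accumulator `base` (incremented on odd indices) with a stateless closed form computing each label directly from its index parity (even l -> l+1, odd l -> -l).
import Mathlib
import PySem

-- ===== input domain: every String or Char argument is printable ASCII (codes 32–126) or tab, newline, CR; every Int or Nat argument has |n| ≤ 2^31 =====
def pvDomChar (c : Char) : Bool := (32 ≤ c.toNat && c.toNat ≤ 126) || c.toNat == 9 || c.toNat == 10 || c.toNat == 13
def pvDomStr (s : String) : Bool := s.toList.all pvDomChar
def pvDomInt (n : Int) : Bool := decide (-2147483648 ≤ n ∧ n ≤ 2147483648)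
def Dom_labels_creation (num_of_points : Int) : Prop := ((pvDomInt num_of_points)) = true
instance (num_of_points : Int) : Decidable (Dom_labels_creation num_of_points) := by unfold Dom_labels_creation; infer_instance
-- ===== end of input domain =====

-- B replaces A's running accumulator `base` with a stateless per-index closed form (simpler decomposition).

-- ===== PORT A =====
-- A's loop state: (base, possible_labels); each branch appends and possibly increments base.
def pvStepA (st : Int × List Int) (l : Int) : Int × List Int :=
  if PySem.Int.mod l 2 == 0 then (st.1, st.2 ++ [1 + st.1 * 2])
  else (st.1 + 1, st.2 ++ [-1 - st.1 * 2])

def labels_creation (num_of_points : Int) : List Int :=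
  ((PySem.List.pyRange 0 num_of_points 1).foldl pvStepA (0, [])).2

-- ===== PORT B =====
def labels_creation_alt (num_of_points : Int) : List Int :=
  (PySem.List.pyRange 0 num_of_points 1).map
    (fun l => if PySem.Int.mod l 2 == 0 then l + 1 else -l)

-- ===== PRECONDITION & SPEC =====
def Spec_labels_creation (num_of_points : Int) (out : List Int) : Prop := out = labels_creation_alt num_of_points
instance (num_of_points : Int) (out : List Int) : Decidable (Spec_labels_creation num_of_points out) := by unfold Spec_labels_creation; infer_instance

-- ===== CLAIM (what is proved, stated in full; the proofs are below) =====
def Claim_equal_labels_creation : Prop := ∀ (num_of_points : Int), Dom_labels_creation num_of_points → Spec_labels_creation num_of_points (labels_creation num_of_points)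

-- ===== LEMMAS AND PROOFS =====

-- one step of A's fold from a consistent state (base = a/2) emits B's closed-form label and keeps base = (a+1)/2
theorem pvStepA_consistent (a : Int) (acc : List Int) :
    pvStepA (a / 2, acc) a
      = ((a + 1) / 2, acc ++ [if PySem.Int.mod a 2 == 0 then a + 1 else -a]) := by
  have hmod : PySem.Int.mod a 2 = a % 2 := PySem.Int.mod_eq_emod_of_pos (by norm_num)
  simp only [pvStepA, hmod]
  rcases Int.even_or_odd a with ⟨k, hk⟩ | ⟨k, hk⟩
  · have hm : a % 2 = 0 := by omega
    simp only [hm]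
    refine Prod.ext ?_ ?_ <;> simp <;> omega
  · have hm : a % 2 = 1 := by omega
    simp only [hm]
    refine Prod.ext ?_ ?_ <;> simp <;> omega

-- loop invariant: folding A's step over range(a, b) from base = a/2 appends exactly B's labels
theorem pvFoldA : ∀ (n : Nat) (a b : Int) (acc : List Int), 0 ≤ a → (b - a).toNat = n →
    (PySem.List.pyRange a b 1).foldl pvStepA (a / 2, acc)
      = ((max a b) / 2,
         acc ++ (PySem.List.pyRange a b 1).map
           (fun l => if PySem.Int.mod l 2 == 0 then l + 1 else -l)) := by
  intro n
  induction n with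
  | zero =>
    intro a b acc ha hn
    have hba : b ≤ a := by omega
    rw [PySem.List.pyRange_one_eq_nil hba]
    simp [max_eq_left hba]
  | succ m ih =>
    intro a b acc ha hn
    have hab : a < b := by omega
    rw [PySem.List.pyRange_one_cons hab]
    simp only [List.foldl_cons, List.map_cons]
    rw [pvStepA_consistent a acc]
    rw [ih (a + 1) b _ (by omega) (by omega)]
    have hmax : max (a + 1) b = max a b := by omega
    rw [hmax, List.append_assoc, List.singleton_append]

-- ===== VERDICT (by name: the statement is the Claim_ definition above) =====
theorem labels_creation_spec : Claim_equal_labels_creation := by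
  intro n _
  unfold Spec_labels_creation labels_creation labels_creation_alt
  have h0 : ((0 : Int), ([] : List Int)) = ((0 : Int) / 2, ([] : List Int)) := by norm_num
  rw [h0, pvFoldA (n - 0).toNat 0 n [] le_rfl rfl]
  simp
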